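-- pv_equiv track=rewrite | github.com/DakshGajjar/Berserker-Selenium | makevid.py | durs_check
-- ===== SOURCE A (Python) =====
-- def durs_check(vidlist,durl):
--     while len(vidlist)>2:
--         if sum(durl)>58:
--             del vidlist[-1]
--             del durl[-1]
--             durs_check(vidlist,durl)
--         else:
--             return vidlist,durl
-- ===== SOURCE B (Python) =====
-- def durs_check(vidlist, durl):
--     # O(n): maintain the running sum instead of recomputing sum(durl) each pop.
--     keep_v = len(vidlist)
--     keep_d = len(durl)
--     total = sum(durl)
--     while keep_v > 2 and total > 58:
--         keep_d -= 1
--         total -= durl[keep_d]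
--         keep_v -= 1
--     del vidlist[keep_v:]
--     del durl[keep_d:]
--     if keep_v > 2:
--         return vidlist, durl
--     return None
-- ===== Notes on version B (the rewrite author's own statement) =====
-- stated objective: faster
-- what changed: Replaces the recursive/while trimming that recomputes sum(durl) on every pop with a single loop over kept-length counters and a maintained running sum, slicing the lists once at the end.
import Mathlib
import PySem

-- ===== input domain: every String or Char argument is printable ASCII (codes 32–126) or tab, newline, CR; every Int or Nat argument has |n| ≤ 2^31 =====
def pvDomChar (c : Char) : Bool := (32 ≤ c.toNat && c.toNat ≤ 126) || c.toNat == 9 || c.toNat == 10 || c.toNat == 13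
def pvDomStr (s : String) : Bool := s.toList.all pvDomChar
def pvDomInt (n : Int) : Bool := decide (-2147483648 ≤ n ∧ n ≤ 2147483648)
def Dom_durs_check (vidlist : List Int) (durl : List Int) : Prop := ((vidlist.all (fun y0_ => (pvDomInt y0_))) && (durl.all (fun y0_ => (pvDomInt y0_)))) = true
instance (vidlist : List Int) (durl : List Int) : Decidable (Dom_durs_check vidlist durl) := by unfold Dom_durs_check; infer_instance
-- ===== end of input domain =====

-- B replaces A's quadratic recompute-sum-per-pop trimming with one O(n) loop keeping a running
-- sum; equivalence is about the RETURN value (both Pythons also trim the argument lists in place).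

-- ===== PORT A =====
-- A's while loop re-checks len/sum after the (result-discarded, same-lists-mutating) recursive
-- call, so each iteration is: pop the last of both lists and continue — transliterated as this
-- recursion (del x[-1] = dropLast).
def durs_check (vidlist : List Int) (durl : List Int) : Option (List Int × List Int) :=
  if (vidlist.length : Int) > 2 then
    if durl.sum > 58 then
      durs_check vidlist.dropLast durl.dropLast
    else some (vidlist, durl)
  else none
termination_by vidlist.length
decreasing_by simp [List.length_dropLast]; omega

-- ===== PORT B =====
-- the while loop of Source B over (keep_v, keep_d, total); durl[keep_d] after the decrement is
-- durl[keep_d - 1], always in range on reachable states (total > 58 forces keep_d ≥ 1).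
def dcLoop (durl : List Int) (keep_v keep_d total : Int) : Int × Int × Int :=
  if keep_v > 2 ∧ total > 58 then
    dcLoop durl (keep_v - 1) (keep_d - 1) (total - PySem.List.pyGetD durl (keep_d - 1) 0)
  else (keep_v, keep_d, total)
termination_by keep_v.toNat
decreasing_by omega

def durs_check_alt (vidlist : List Int) (durl : List Int) : Option (List Int × List Int) :=
  let r := dcLoop durl (vidlist.length : Int) (durl.length : Int) durl.sum
  if r.1 > 2 then some (vidlist.take r.1.toNat, durl.take r.2.1.toNat) else none

-- ===== PRECONDITION & SPEC =====
def Spec_durs_check (vidlist : List Int) (durl : List Int) (out : Option (List Int × List Int)) : Prop := out = durs_check_alt vidlist durl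
instance (vidlist : List Int) (durl : List Int) (out : Option (List Int × List Int)) : Decidable (Spec_durs_check vidlist durl out) := by unfold Spec_durs_check; infer_instance

-- ===== CLAIM (what is proved, stated in full; the proofs are below) =====
def Claim_equal_durs_check : Prop := ∀ (vidlist : List Int) (durl : List Int), Dom_durs_check vidlist durl → Spec_durs_check vidlist durl (durs_check vidlist durl)

-- ===== LEMMAS AND PROOFS =====

-- the loop never increases the kept lengths
lemma dcLoop_mono (durl : List Int) (kv kd t : Int) :
    (dcLoop durl kv kd t).1 ≤ kv ∧ (dcLoop durl kv kd t).2.1 ≤ kd := by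
  induction kv, kd, t using dcLoop.induct durl with
  | case1 kv kd t h ih =>
      rw [dcLoop, if_pos h]
      exact ⟨le_trans ih.1 (by omega), le_trans ih.2 (by omega)⟩
  | case2 kv kd t h =>
      rw [dcLoop, if_neg h]
      exact ⟨le_rfl, le_rfl⟩

-- with the invariant total = sum of the first keep_d elements, the last element of durl is
-- never read, so the loop behaves the same on durl.dropLast
lemma dcLoop_shift (durl : List Int) (f : Nat) :
    ∀ kv kd : Int, kv.toNat ≤ f → 0 ≤ kd → kd ≤ (durl.length : Int) - 1 →
    dcLoop durl kv kd ((durl.take kd.toNat).sum)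
      = dcLoop durl.dropLast kv kd ((durl.take kd.toNat).sum) := by
  induction f with
  | zero =>
      intro kv kd hf h0 h1
      rw [dcLoop]
      conv_rhs => rw [dcLoop]
      have : ¬ (kv > 2 ∧ (durl.take kd.toNat).sum > 58) := by omega
      rw [if_neg this, if_neg this]
  | succ f ih =>
      intro kv kd hf h0 h1
      rw [dcLoop]
      conv_rhs => rw [dcLoop]
      by_cases h : kv > 2 ∧ (durl.take kd.toNat).sum > 58
      · rw [if_pos h, if_pos h]
        have hkd1 : 1 ≤ kd := by
          by_contra hc
          have : kd.toNat = 0 := by omega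
          simp [this] at h
        have hidx : (kd - 1).toNat < durl.length - 1 := by omega
        have hidx' : (kd - 1).toNat < durl.dropLast.length := by
          simpa [List.length_dropLast] using hidx
        have hget : PySem.List.pyGetD durl (kd - 1) 0 = durl[(kd - 1).toNat] :=
          PySem.List.pyGetD_eq_getElem durl 0 (by omega) (by omega)
        have hget' : PySem.List.pyGetD durl.dropLast (kd - 1) 0 = durl.dropLast[(kd - 1).toNat] :=
          PySem.List.pyGetD_eq_getElem durl.dropLast 0 (by omega)
            (by rw [List.length_dropLast]; omega)
        have heq : durl.dropLast[(kd - 1).toNat] = durl[(kd - 1).toNat] := by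
          simp [List.getElem_dropLast]
        have hsum : (durl.take kd.toNat).sum - durl[(kd - 1).toNat]
            = (durl.take (kd - 1).toNat).sum := by
          have hk : kd.toNat = (kd - 1).toNat + 1 := by omega
          rw [hk, List.sum_take_succ durl (kd - 1).toNat (by omega)]
          ring
        rw [hget, hget', heq, hsum]
        exact ih (kv - 1) (kd - 1) (by omega) (by omega) (by omega)
      · rw [if_neg h, if_neg h]

-- B satisfies A's recurrence
lemma alt_rec (vl dl : List Int) :
    durs_check_alt vl dl =
      if (vl.length : Int) > 2 then
        if dl.sum > 58 then durs_check_alt vl.dropLast dl.dropLast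
        else some (vl, dl)
      else none := by
  by_cases hn : (vl.length : Int) > 2
  · by_cases hs : dl.sum > 58
    · rw [if_pos hn, if_pos hs]
      have hm : 1 ≤ dl.length := by
        by_contra hc
        have : dl = [] := by
          cases dl with
          | nil => rfl
          | cons a l => simp at hc
        simp [this] at hs
      have hne : dl ≠ [] := by
        intro hc; simp [hc] at hm
      -- one step of the loop on the left
      have hget : PySem.List.pyGetD dl ((dl.length : Int) - 1) 0 = dl.getLast hne := by
        rw [PySem.List.pyGetD_eq_getElem dl 0 (by omega) (by omega),
          List.getLast_eq_getElem hne]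
        congr 1
        omega
      have hsum : dl.sum - dl.getLast hne = (dl.take (((dl.length : Int) - 1)).toNat).sum := by
        have hsplit : dl.dropLast ++ [dl.getLast hne] = dl := List.dropLast_concat_getLast hne
        have : dl.sum = dl.dropLast.sum + dl.getLast hne := by
          conv_lhs => rw [← hsplit]
          simp
        rw [this]
        have htk : dl.take (((dl.length : Int) - 1)).toNat = dl.dropLast := by
          rw [List.dropLast_eq_take]
          congr 1
          omega
        rw [htk]; ring
      have hstep : dcLoop dl (vl.length : Int) (dl.length : Int) dl.sum
          = dcLoop dl.dropLast ((vl.length : Int) - 1) ((dl.length : Int) - 1)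
              ((dl.take (((dl.length : Int) - 1)).toNat).sum) := by
        rw [dcLoop, if_pos ⟨hn, hs⟩]
        rw [hget, hsum]
        have := dcLoop_shift dl ((vl.length : Int) - 1).toNat ((vl.length : Int) - 1)
          ((dl.length : Int) - 1) (le_refl _) (by omega) (by omega)
        exact this
      -- rewrite the right-hand side's loop to the same call
      have hvl' : (vl.dropLast.length : Int) = (vl.length : Int) - 1 := by
        simp [List.length_dropLast]; omega
      have hdl' : (dl.dropLast.length : Int) = (dl.length : Int) - 1 := by
        simp [List.length_dropLast]; omega
      have hsum' : dl.dropLast.sum = (dl.take (((dl.length : Int) - 1)).toNat).sum := by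
        congr 1
        rw [List.dropLast_eq_take]
        congr 1
        omega
      unfold durs_check_alt
      rw [hstep, hvl', hdl', hsum']
      -- final results agree because the kept prefixes agree
      set r := dcLoop dl.dropLast ((vl.length : Int) - 1) ((dl.length : Int) - 1)
          ((dl.take (((dl.length : Int) - 1)).toNat).sum) with hr
      have hmono := dcLoop_mono dl.dropLast ((vl.length : Int) - 1) ((dl.length : Int) - 1)
          ((dl.take (((dl.length : Int) - 1)).toNat).sum)
      rw [← hr] at hmono
      by_cases hres : r.1 > 2
      · rw [if_pos hres, if_pos hres]
        have htv : vl.take r.1.toNat = vl.dropLast.take r.1.toNat := by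
          rw [List.dropLast_eq_take, List.take_take]
          congr 1
          omega
        have htd : dl.take r.2.1.toNat = dl.dropLast.take r.2.1.toNat := by
          rw [List.dropLast_eq_take, List.take_take]
          congr 1
          omega
        rw [htv, htd]
      · rw [if_neg hres, if_neg hres]
    · rw [if_pos hn, if_neg hs]
      have hloop : dcLoop dl (vl.length : Int) (dl.length : Int) dl.sum
          = ((vl.length : Int), (dl.length : Int), dl.sum) := by
        rw [dcLoop, if_neg (by omega)]
      unfold durs_check_alt
      rw [hloop]
      simp [hn]
  · rw [if_neg hn]
    have hloop : dcLoop dl (vl.length : Int) (dl.length : Int) dl.sum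
        = ((vl.length : Int), (dl.length : Int), dl.sum) := by
      rw [dcLoop, if_neg (by omega)]
    unfold durs_check_alt
    rw [hloop]
    simp [hn]

lemma durs_check_eq_alt (vl dl : List Int) : durs_check vl dl = durs_check_alt vl dl := by
  induction vl, dl using durs_check.induct with
  | case1 vl dl hn hs ih =>
      rw [durs_check, if_pos hn, if_pos hs, alt_rec, if_pos hn, if_pos hs, ih]
  | case2 vl dl hn hs =>
      rw [durs_check, if_pos hn, if_neg hs, alt_rec, if_pos hn, if_neg hs]
  | case3 vl dl hn =>
      rw [durs_check, if_neg hn, alt_rec, if_neg hn]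

-- ===== VERDICT (by name: the statement is the Claim_ definition above) =====
theorem durs_check_spec : Claim_equal_durs_check := by
  intro vl dl _
  unfold Spec_durs_check
  exact durs_check_eq_alt vl dl
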